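-- pv_equiv track=rewrite | github.com/UPstartDeveloper/Problem_Solving_Practice | miscellaneous/electronics.py | get_money_spent
-- ===== SOURCE A (Python) =====
-- def get_money_spent(keyboards, drives, b):
--     # calculate all ways the customer can purchase the product
--     max_combo = 0
--     for k_price in keyboards:
--         for d_price in drives:
--             combo = k_price + d_price
--             # only add combos within budget, and that have both products
--             if combo <= b and k_price > 0 and d_price > 0:
--                 if combo > max_combo:
--                     max_combo = combo
--     # check to make sure a max_combo was able to be found
--     if max_combo == 0:
--         max_combo = -1
--     return max_combo
-- ===== SOURCE B (Python) =====
-- def get_money_spent(keyboards, drives, b):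
--     # sort the positive drive prices once; for each affordable keyboard,
--     # binary-search the most expensive drive that still fits the budget
--     ds = sorted([d for d in drives if d > 0])
--     best = -1
--     for k in keyboards:
--         if k <= 0:
--             continue
--         t = b - k
--         lo, hi = 0, len(ds)
--         while lo < hi:
--             mid = (lo + hi) // 2
--             if ds[mid] <= t:
--                 lo = mid + 1
--             else:
--                 hi = mid
--         if lo > 0:
--             combo = k + ds[lo - 1]
--             if combo > best:
--                 best = combo
--     return best
-- ===== Notes on version B (the rewrite author's own statement) =====
-- stated objective: faster
-- what changed: Replaces A's nested scan over every keyboard-drive pair by sorting the positive drive prices once and, for each affordable keyboard, binary-searching the most expensive drive that still fits the budget.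
import Mathlib
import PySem

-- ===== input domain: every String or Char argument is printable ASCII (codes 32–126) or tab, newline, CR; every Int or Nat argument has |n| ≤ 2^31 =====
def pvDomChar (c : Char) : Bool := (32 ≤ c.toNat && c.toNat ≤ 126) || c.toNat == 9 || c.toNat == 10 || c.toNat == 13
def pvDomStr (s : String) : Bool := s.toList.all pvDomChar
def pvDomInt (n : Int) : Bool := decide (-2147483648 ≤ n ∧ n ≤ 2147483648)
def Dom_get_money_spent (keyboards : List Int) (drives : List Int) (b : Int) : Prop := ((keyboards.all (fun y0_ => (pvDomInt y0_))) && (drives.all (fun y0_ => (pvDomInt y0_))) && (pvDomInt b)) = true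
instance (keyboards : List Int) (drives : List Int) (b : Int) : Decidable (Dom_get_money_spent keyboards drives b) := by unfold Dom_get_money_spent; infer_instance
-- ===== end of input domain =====

-- B replaces A's full nested scan of keyboard×drive pairs by sorting the positive
-- drive prices once and binary-searching, for each keyboard, the costliest drive
-- that still fits the budget (objective: faster, O(n·m) → O((n+m)·log m)).

-- ===== PORT A =====
def get_money_spent (keyboards : List Int) (drives : List Int) (b : Int) : Int :=
  let max_combo :=
    keyboards.foldl (fun max_combo k_price =>
      drives.foldl (fun max_combo d_price =>
        let combo := k_price + d_price
        if combo ≤ b ∧ k_price > 0 ∧ d_price > 0 then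
          if combo > max_combo then combo else max_combo
        else max_combo) max_combo) 0
  if max_combo = 0 then -1 else max_combo

-- ===== PORT B =====
-- hand-written binary search of Source B: largest index boundary lo with ds[lo-1] ≤ t
def pvBsLoop (ds : List Int) (t : Int) (lo hi : Nat) : Nat :=
  if _h : lo < hi then
    if ds.getD ((lo + hi) / 2) 0 ≤ t then pvBsLoop ds t ((lo + hi) / 2 + 1) hi
    else pvBsLoop ds t lo ((lo + hi) / 2)
  else lo
termination_by hi - lo
decreasing_by all_goals omega

def get_money_spent_alt (keyboards : List Int) (drives : List Int) (b : Int) : Int :=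
  let ds := PySem.List.sorted (drives.filter (fun d => decide (d > 0))) (fun x => x) false
  keyboards.foldl (fun best k =>
    if k ≤ 0 then best
    else
      let t := b - k
      let lo := pvBsLoop ds t 0 ds.length
      if 0 < lo then
        let combo := k + ds.getD (lo - 1) 0
        if combo > best then combo else best
      else best) (-1)

-- ===== PRECONDITION & SPEC =====
def Spec_get_money_spent (keyboards : List Int) (drives : List Int) (b : Int) (out : Int) : Prop := out = get_money_spent_alt keyboards drives b
instance (keyboards : List Int) (drives : List Int) (b : Int) (out : Int) : Decidable (Spec_get_money_spent keyboards drives b out) := by unfold Spec_get_money_spent; infer_instance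

-- ===== CLAIM (what is proved, stated in full; the proofs are below) =====
def Claim_equal_get_money_spent : Prop := ∀ (keyboards : List Int) (drives : List Int) (b : Int), Dom_get_money_spent keyboards drives b → Spec_get_money_spent keyboards drives b (get_money_spent keyboards drives b)

-- ===== LEMMAS AND PROOFS =====

-- the flat list of all within-budget combos of one positive keyboard and one positive drive
def pvL (keyboards drives : List Int) (b : Int) : List Int :=
  keyboards.flatMap (fun k =>
    if 0 < k then (drives.filter (fun d => decide (0 < d ∧ k + d ≤ b))).map (fun d => k + d)
    else [])

lemma pv_if_max (m c : Int) : (if c > m then c else m) = max m c := by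
  rcases le_total c m with h | h <;> simp [max_def] <;> omega

lemma pv_le_foldl_max (L : List Int) : ∀ a : Int, a ≤ L.foldl max a := by
  induction L with
  | nil => intro a; simp
  | cons x L ih => intro a; exact le_trans (le_max_left a x) (ih (max a x))

lemma pv_foldl_max_const (L : List Int) : ∀ a : Int, (∀ x ∈ L, x ≤ a) → L.foldl max a = a := by
  induction L with
  | nil => intro a _; rfl
  | cons x L ih =>
      intro a h
      simp only [List.foldl_cons]
      have hx : max a x = a := max_eq_left (h x (by simp))
      rw [hx]
      exact ih a (fun y hy => h y (by simp [hy]))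

lemma pv_foldl_max_eq (L : List Int) : ∀ (m c : Int), c ∈ L → (∀ x ∈ L, x ≤ c) →
    L.foldl max m = max m c := by
  induction L with
  | nil => intro m c hc _; simp at hc
  | cons x L ih =>
      intro m c hc hall
      simp only [List.foldl_cons]
      rcases List.mem_cons.mp hc with rfl | hL
      · have : ∀ y ∈ L, y ≤ max m c := fun y hy => le_trans (hall y (by simp [hy])) (le_max_right m c)
        rw [pv_foldl_max_const L (max m c) this]
      · have hxle : x ≤ c := hall x (by simp)
        rw [ih (max m x) c hL (fun y hy => hall y (by simp [hy]))]
        rw [max_assoc]  -- max (max m x) c = max m (max x c)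
        rw [max_eq_right hxle]

lemma pv_perm_foldl_max {L1 L2 : List Int} (h : L1.Perm L2) (a : Int) :
    L1.foldl max a = L2.foldl max a := by
  induction h generalizing a with
  | nil => rfl
  | cons x _ ih => simp only [List.foldl_cons]; exact ih _
  | swap x y l => simp only [List.foldl_cons, max_right_comm]
  | trans _ _ ih1 ih2 => exact (ih1 a).trans (ih2 a)

lemma pv_innerA (drives : List Int) (b k : Int) : ∀ m : Int,
    drives.foldl (fun mc d =>
        if k + d ≤ b ∧ k > 0 ∧ d > 0 then (if k + d > mc then k + d else mc) else mc) m
      = (if 0 < k then (drives.filter (fun d => decide (0 < d ∧ k + d ≤ b))).map (fun d => k + d)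
         else []).foldl max m := by
  induction drives with
  | nil => intro m; by_cases hk : 0 < k <;> simp [hk]
  | cons d ds ih =>
      intro m
      simp only [List.foldl_cons]
      by_cases hk : 0 < k
      · by_cases hd : (0 : Int) < d ∧ k + d ≤ b
        · have hcond : k + d ≤ b ∧ k > 0 ∧ d > 0 := ⟨hd.2, hk, hd.1⟩
          rw [if_pos hcond, pv_if_max, ih (max m (k + d))]
          simp [hk, hd]
        · have hcond : ¬(k + d ≤ b ∧ k > 0 ∧ d > 0) := by
            intro h; exact hd ⟨h.2.2, h.1⟩
          rw [if_neg hcond, ih m]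
          simp [hk, hd]
      · have hcond : ¬(k + d ≤ b ∧ k > 0 ∧ d > 0) := by intro h; exact hk h.2.1
        rw [if_neg hcond, ih m]
        simp [hk]

lemma pv_A_fold (keyboards drives : List Int) (b : Int) : ∀ m : Int,
    keyboards.foldl (fun mc k =>
        drives.foldl (fun mc d =>
          if k + d ≤ b ∧ k > 0 ∧ d > 0 then (if k + d > mc then k + d else mc) else mc) mc) m
      = (pvL keyboards drives b).foldl max m := by
  induction keyboards with
  | nil => intro m; simp [pvL]
  | cons k ks ih =>
      intro m
      simp only [List.foldl_cons, pvL, List.flatMap_cons, List.foldl_append]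
      rw [pv_innerA drives b k m, ih]
      rfl

lemma pv_mono_of_pairwise {ds : List Int} (hs : ds.Pairwise (· ≤ ·)) :
    ∀ i j (hi : i < ds.length) (hj : j < ds.length), i ≤ j → ds[i] ≤ ds[j] := by
  intro i j hi hj hij
  rcases Nat.lt_or_ge i j with h | h
  · exact (List.pairwise_iff_getElem.mp hs) i j hi hj h
  · have : i = j := le_antisymm hij h
    subst this; exact le_refl _

lemma pvBsLoop_spec (ds : List Int) (t : Int) (hs : ds.Pairwise (· ≤ ·)) :
    ∀ n lo hi, hi - lo ≤ n → lo ≤ hi → hi ≤ ds.length →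
      (∀ j (hj : j < ds.length), j < lo → ds[j] ≤ t) →
      (∀ j (hj : j < ds.length), hi ≤ j → t < ds[j]) →
      pvBsLoop ds t lo hi ≤ ds.length ∧
      (∀ j (hj : j < ds.length), j < pvBsLoop ds t lo hi → ds[j] ≤ t) ∧
      (∀ j (hj : j < ds.length), pvBsLoop ds t lo hi ≤ j → t < ds[j]) := by
  have mono := pv_mono_of_pairwise hs
  intro n
  induction n with
  | zero =>
      intro lo hi hn hlh hlen h1 h2
      have : lo = hi := by omega
      subst this
      rw [pvBsLoop]
      simp only [lt_irrefl, dite_false]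
      exact ⟨hlen, h1, h2⟩
  | succ n ih =>
      intro lo hi hn hlh hlen h1 h2
      rw [pvBsLoop]
      by_cases h : lo < hi
      · rw [dif_pos h]
        have hmid : (lo + hi) / 2 < ds.length := by omega
        rw [List.getD_eq_getElem ds 0 hmid]
        by_cases hle : ds[(lo + hi) / 2] ≤ t
        · rw [if_pos hle]
          refine ih ((lo + hi) / 2 + 1) hi (by omega) (by omega) hlen ?_ h2
          intro j hj hjlt
          exact le_trans (mono j ((lo + hi) / 2) hj hmid (by omega)) hle
        · rw [if_neg hle]
          refine ih lo ((lo + hi) / 2) (by omega) (by omega) (by omega) h1 ?_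
          intro j hj hjge
          exact lt_of_lt_of_le (lt_of_not_ge hle) (mono ((lo + hi) / 2) j hmid hj hjge)
      · rw [dif_neg h]
        have : lo = hi := by omega
        subst this
        exact ⟨hlen, h1, h2⟩

lemma pv_B_step (ds : List Int) (hs : ds.Pairwise (· ≤ ·)) (t k m : Int) :
    ((ds.filter (fun d => decide (d ≤ t))).map (fun d => k + d)).foldl max m
      = (if 0 < pvBsLoop ds t 0 ds.length then
           (if k + ds.getD (pvBsLoop ds t 0 ds.length - 1) 0 > m
            then k + ds.getD (pvBsLoop ds t 0 ds.length - 1) 0 else m)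
         else m) := by
  obtain ⟨hr, hlt, hge⟩ := pvBsLoop_spec ds t hs ds.length 0 ds.length (by omega) (by omega)
    (le_refl _) (by omega) (by intro j hj h; omega)
  set r := pvBsLoop ds t 0 ds.length with hrdef
  by_cases hr0 : 0 < r
  · rw [if_pos hr0]
    have hr1 : r - 1 < ds.length := by omega
    rw [List.getD_eq_getElem ds 0 hr1, pv_if_max]
    apply pv_foldl_max_eq
    · apply List.mem_map.mpr
      refine ⟨ds[r-1], ?_, rfl⟩
      apply List.mem_filter.mpr
      exact ⟨List.getElem_mem hr1, by simpa using hlt (r-1) hr1 (by omega)⟩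
    · intro x hx
      obtain ⟨d, hd, rfl⟩ := List.mem_map.mp hx
      have hd' := List.mem_filter.mp hd
      have hdt : d ≤ t := by simpa using hd'.2
      obtain ⟨j, hj, rfl⟩ := List.mem_iff_getElem.mp hd'.1
      have hjr : j < r := by
        by_contra hc
        exact absurd hdt (not_le.mpr (hge j hj (by omega)))
      have := pv_mono_of_pairwise hs j (r-1) hj hr1 (by omega)
      omega
  · rw [if_neg hr0]
    have : ds.filter (fun d => decide (d ≤ t)) = [] := by
      apply List.filter_eq_nil_iff.mpr
      intro d hd
      obtain ⟨j, hj, rfl⟩ := List.mem_iff_getElem.mp hd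
      simpa using not_le.mpr (hge j hj (by omega))
    rw [this]
    rfl

lemma pv_B_fold (keyboards drives : List Int) (b : Int) : ∀ m : Int,
    keyboards.foldl (fun best k =>
        if k ≤ 0 then best
        else
          if 0 < pvBsLoop (PySem.List.sorted (drives.filter (fun d => decide (d > 0))) (fun x => x) false) (b - k) 0
                 (PySem.List.sorted (drives.filter (fun d => decide (d > 0))) (fun x => x) false).length then
            (if k + (PySem.List.sorted (drives.filter (fun d => decide (d > 0))) (fun x => x) false).getD
                  (pvBsLoop (PySem.List.sorted (drives.filter (fun d => decide (d > 0))) (fun x => x) false) (b - k) 0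
                    (PySem.List.sorted (drives.filter (fun d => decide (d > 0))) (fun x => x) false).length - 1) 0 > best
             then k + (PySem.List.sorted (drives.filter (fun d => decide (d > 0))) (fun x => x) false).getD
                  (pvBsLoop (PySem.List.sorted (drives.filter (fun d => decide (d > 0))) (fun x => x) false) (b - k) 0
                    (PySem.List.sorted (drives.filter (fun d => decide (d > 0))) (fun x => x) false).length - 1) 0
             else best)
          else best) m
      = (pvL keyboards drives b).foldl max m := by
  set ds := PySem.List.sorted (drives.filter (fun d => decide (d > 0))) (fun x => x) false with hds
  have hsorted : ds.Pairwise (· ≤ ·) := by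
    simpa using PySem.List.sorted_pairwise (drives.filter (fun d => decide (d > 0))) (fun x => x)
  have hperm : ds.Perm (drives.filter (fun d => decide (d > 0))) :=
    PySem.List.sorted_perm _ _ _
  induction keyboards with
  | nil => intro m; simp [pvL]
  | cons k ks ih =>
      intro m
      simp only [List.foldl_cons, pvL, List.flatMap_cons, List.foldl_append]
      by_cases hk : k ≤ 0
      · rw [if_pos hk, if_neg (by omega), ih m]
        rfl
      · rw [if_neg hk, ← pv_B_step ds hsorted (b - k) k m, ih]
        have hfperm : (ds.filter (fun d => decide (d ≤ b - k))).Perm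
            ((drives.filter (fun d => decide (d > 0))).filter (fun d => decide (d ≤ b - k))) :=
          hperm.filter _
        have hff : (drives.filter (fun d => decide (d > 0))).filter (fun d => decide (d ≤ b - k))
            = drives.filter (fun d => decide (0 < d ∧ k + d ≤ b)) := by
          rw [List.filter_filter]
          apply List.filter_congr
          intro x _
          by_cases h1 : (0 : Int) < x <;> by_cases h2 : x ≤ b - k <;>
            simp [h1, h2] <;> omega
        rw [hff] at hfperm
        rw [if_pos (by omega : 0 < k)]
        simp only [pvL]
        congr 1
        exact pv_perm_foldl_max (hfperm.map (fun d => k + d)) m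

lemma pv_L_lb (keyboards drives : List Int) (b : Int) :
    ∀ x ∈ pvL keyboards drives b, 2 ≤ x := by
  intro x hx
  obtain ⟨k, _, hmem⟩ := List.mem_flatMap.mp hx
  by_cases hk : 0 < k
  · rw [if_pos hk] at hmem
    obtain ⟨d, hd, rfl⟩ := List.mem_map.mp hmem
    have := (List.mem_filter.mp hd).2
    simp only [decide_eq_true_eq] at this
    omega
  · rw [if_neg hk] at hmem
    simp at hmem

-- ===== VERDICT (by name: the statement is the Claim_ definition above) =====
theorem get_money_spent_spec : Claim_equal_get_money_spent := by
  unfold Claim_equal_get_money_spent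
  intro keyboards drives b _dom
  unfold Spec_get_money_spent get_money_spent get_money_spent_alt
  rw [pv_A_fold keyboards drives b 0, pv_B_fold keyboards drives b (-1)]
  have hlb := pv_L_lb keyboards drives b
  cases hL : pvL keyboards drives b with
  | nil => simp
  | cons x L =>
      have hx2 : 2 ≤ x := hlb x (by rw [hL]; simp)
      simp only [List.foldl_cons]
      have h0 : max (0 : Int) x = x := by omega
      have h1 : max (-1 : Int) x = x := by omega
      rw [h0, h1]
      have := pv_le_foldl_max L x
      rw [if_neg (by omega : ¬ L.foldl max x = 0)]
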